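-- pv_equiv track=rewrite | github.com/SynKolbasyn/School | Lesson_01_09_2023/src/Task_18.py | solution
-- ===== SOURCE A (Python) =====
-- def solution(n: int) -> str:
-- 	result = ""
-- 	old_result = ""
-- 	for i in range(1, n + 1):
-- 		result += f"{i}"
-- 		if len(result) > n:
-- 			return old_result
-- 		old_result = result
-- 	return result
-- ===== SOURCE B (Python) =====
-- def solution(n: int) -> str:
--     # pass 1: count how many integers fit
--     total = 0
--     k = 0
--     for i in range(1, n + 1):
--         d = len(str(i))
--         if total + d > n:
--             break
--         total += d
--         k += 1
--     # pass 2: build the answer from the count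
--     return "".join(str(j) for j in range(1, k + 1))
-- ===== Notes on version B (the rewrite author's own statement) =====
-- stated objective: alternative
-- what changed: A grows the string inside the loop while remembering the previous value (the alias forces a full copy per iteration) and returns early; B first runs a counting pass summing digit lengths to find how many integers fit, then builds the result in a separate join pass.
import Mathlib
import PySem

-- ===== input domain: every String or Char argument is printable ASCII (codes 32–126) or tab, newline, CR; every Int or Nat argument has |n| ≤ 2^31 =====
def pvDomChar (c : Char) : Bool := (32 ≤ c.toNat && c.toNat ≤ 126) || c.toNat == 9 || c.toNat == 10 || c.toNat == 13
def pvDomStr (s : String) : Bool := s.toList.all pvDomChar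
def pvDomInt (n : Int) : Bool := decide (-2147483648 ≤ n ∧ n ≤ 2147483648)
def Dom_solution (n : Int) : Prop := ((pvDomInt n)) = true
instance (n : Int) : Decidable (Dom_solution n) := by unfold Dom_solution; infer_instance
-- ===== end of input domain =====

-- B replaces A's interleaved grow-string/compare/remember-previous loop by a counting pass
-- (how many integers fit) followed by a separate join that builds the answer; objective: alternative decomposition.

-- ===== PORT A =====
-- the for-loop of A: state (result, old_result); early return old_result when the length exceeds n
def solutionLoop (n : Int) : List Int → String → String → String
  | [], result, _old_result => result
  | i :: rest, result, old_result =>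
    let result' := result ++ PySem.Int.toStr i
    if PySem.Str.len result' > n then old_result
    else solutionLoop n rest result' result'

def solution (n : Int) : String :=
  solutionLoop n (PySem.List.pyRange 1 (n + 1) 1) "" ""

-- ===== PORT B =====
-- pass 1 of B: count how many integers fit (break modeled by returning k)
def countLoop (n : Int) : List Int → Int → Int → Int
  | [], _total, k => k
  | i :: rest, total, k =>
    let d := PySem.Str.len (PySem.Int.toStr i)
    if total + d > n then k
    else countLoop n rest (total + d) (k + 1)

def solution_alt (n : Int) : String :=
  let k := countLoop n (PySem.List.pyRange 1 (n + 1) 1) 0 0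
  PySem.Str.join "" ((PySem.List.pyRange 1 (k + 1) 1).map PySem.Int.toStr)

-- ===== PRECONDITION & SPEC =====
def Spec_solution (n : Int) (out : String) : Prop := out = solution_alt n
instance (n : Int) (out : String) : Decidable (Spec_solution n out) := by unfold Spec_solution; infer_instance

-- ===== CLAIM (what is proved, stated in full; the proofs are below) =====
def Claim_equal_solution : Prop := ∀ (n : Int), Dom_solution n → Spec_solution n (solution n)

-- ===== LEMMAS AND PROOFS =====

-- the string B builds from a count k
def buildStr (k : Int) : String :=
  PySem.Str.join "" ((PySem.List.pyRange 1 (k + 1) 1).map PySem.Int.toStr)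

theorem join_nil_concat (l : List (List Char)) (c : List Char) :
    PySem.Chars.join [] (l ++ [c]) = PySem.Chars.join [] l ++ c := by
  induction l with
  | nil => simp [PySem.Chars.join_nil, PySem.Chars.join_singleton]
  | cons a l ih =>
    cases l with
    | nil =>
      simp [PySem.Chars.join_cons_cons, PySem.Chars.join_singleton]
    | cons b l' =>
      simp only [List.cons_append, PySem.Chars.join_cons_cons]
      rw [← List.cons_append, ih]
      simp [List.append_assoc]

theorem buildStr_succ (k : Int) (hk : 0 ≤ k) :
    buildStr (k + 1) = buildStr k ++ PySem.Int.toStr (k + 1) := by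
  unfold buildStr
  rw [PySem.List.pyRange_one_append 1 (k + 1) (k + 1 + 1) (by omega) (by omega),
    PySem.List.pyRange_one_singleton]
  apply String.ext
  simp only [List.map_append, List.map_cons, List.map_nil, PySem.Str.toList_join,
    String.toList_append]
  rw [show ("".toList) = ([] : List Char) from rfl, join_nil_concat]

theorem main_lemma (n m : Int) (j : Nat) :
    ∀ (k : Int) (res : String), 0 ≤ k → (m - (k + 1)).toNat ≤ j → res = buildStr k →
    solutionLoop n (PySem.List.pyRange (k + 1) m 1) res res
      = buildStr (countLoop n (PySem.List.pyRange (k + 1) m 1) (PySem.Str.len res) k) := by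
  induction j with
  | zero =>
    intro k res hk hj hres
    rw [PySem.List.pyRange_one_eq_nil (by omega)]
    simpa [solutionLoop, countLoop] using hres
  | succ j ih =>
    intro k res hk hj hres
    by_cases hm : m ≤ k + 1
    · rw [PySem.List.pyRange_one_eq_nil hm]
      simpa [solutionLoop, countLoop] using hres
    · rw [PySem.List.pyRange_one_cons (by omega)]
      simp only [solutionLoop, countLoop]
      rw [PySem.Str.len_append]
      split_ifs with hgt
      · exact hres
      · rw [← PySem.Str.len_append]
        have : res ++ PySem.Int.toStr (k + 1) = buildStr (k + 1) := by
          rw [hres, ← buildStr_succ k hk]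
        rw [this]
        exact ih (k + 1) _ (by omega) (by omega) rfl

-- ===== VERDICT (by name: the statement is the Claim_ definition above) =====
theorem solution_spec : Claim_equal_solution := by
  intro n _
  unfold Spec_solution solution solution_alt
  have h := main_lemma n (n + 1) ((n + 1 - 1).toNat) 0 "" le_rfl (by omega) (by
    unfold buildStr
    rw [PySem.List.pyRange_one_eq_nil (by omega)]
    rfl)
  simpa [buildStr] using h
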